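-- pv_equiv track=rewrite | github.com/Tahuubinh/mdlm_llm_search | properties/molecules.py | fix_basic_syntax_tokens
-- ===== SOURCE A (Python) =====
-- def fix_basic_syntax_tokens(tokens):
--     # Replace excess ')' with <pad> from left to right
--     open_count = 0
--     for i, token in enumerate(tokens):
--         if token == '(':
--             open_count += 1
--         elif token == ')':
--             if open_count > 0:
--                 open_count -= 1
--             else:
--                 tokens[i] = '<pad>'
--
--     # Replace excess '(' with <pad> from right to left
--     close_count = 0
--     for i in range(len(tokens) - 1, -1, -1):
--         if tokens[i] == ')':
--             close_count += 1
--         elif tokens[i] == '(':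
--             if close_count > 0:
--                 close_count -= 1
--             else:
--                 tokens[i] = '<pad>'
--
--     # Balance ring numbers 1–9
--     ring_counts = {str(i): 0 for i in range(1, 10)}
--     for token in tokens:
--         if token in ring_counts:
--             ring_counts[token] += 1
--
--     for i, token in enumerate(tokens):
--         if token in ring_counts and ring_counts[token] % 2 != 0:
--             tokens[i] = '<pad>'
--             ring_counts[token] -= 1
--
--     return tokens
-- ===== SOURCE B (Python) =====
-- def fix_basic_syntax_tokens(tokens):
--     # One left-to-right pass with a stack of indices of unmatched '('
--     stack = []
--     for i, t in enumerate(tokens):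
--         if t == '(':
--             stack.append(i)
--         elif t == ')':
--             if stack:
--                 stack.pop()
--             else:
--                 tokens[i] = '<pad>'
--     for i in stack:
--         tokens[i] = '<pad>'
--
--     # Pad the first occurrence of each ring digit with an odd total count
--     odd = {d for d in '123456789' if tokens.count(d) % 2 == 1}
--     for i, t in enumerate(tokens):
--         if t in odd:
--             tokens[i] = '<pad>'
--             odd.remove(t)
--     return tokens
-- ===== Notes on version B (the rewrite author's own statement) =====
-- stated objective: alternative
-- what changed: B replaces A's two directional paren passes (left-to-right for excess ')' then right-to-left for excess '(') with a single left-to-right pass keeping a stack of indices of unmatched '(' (padded after the loop), and replaces the ring-count dict by the set of digits with odd total count, padding the first occurrence of each.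
import Mathlib
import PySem

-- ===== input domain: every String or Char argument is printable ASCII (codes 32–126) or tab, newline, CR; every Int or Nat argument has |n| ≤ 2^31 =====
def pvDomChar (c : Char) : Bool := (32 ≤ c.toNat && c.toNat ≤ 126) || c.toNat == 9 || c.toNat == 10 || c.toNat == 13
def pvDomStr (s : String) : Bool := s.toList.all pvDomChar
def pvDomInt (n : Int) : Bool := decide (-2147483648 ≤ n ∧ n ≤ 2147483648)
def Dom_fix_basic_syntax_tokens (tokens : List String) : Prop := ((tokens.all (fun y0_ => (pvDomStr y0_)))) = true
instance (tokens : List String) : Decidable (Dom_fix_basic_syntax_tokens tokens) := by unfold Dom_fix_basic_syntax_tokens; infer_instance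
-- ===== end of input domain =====

-- B replaces A's two directional paren passes by one stack pass over indices, and A's
-- ring-count dict by the set of odd-count digits; same return value (A and B both mutate
-- the Python argument in place the same way), objective: alternative algorithm.


-- ===== PORT A =====
-- pass 1: left to right, excess ')' become '<pad>' (open_count threaded as state)
def afix1 : List String → Nat → List String
  | [], _ => []
  | t :: ts, oc =>
    if t = "(" then t :: afix1 ts (oc + 1)
    else if t = ")" then
      if oc > 0 then t :: afix1 ts (oc - 1)
      else "<pad>" :: afix1 ts oc
    else t :: afix1 ts oc

-- pass 2: right to left (suffix processed first), excess '(' become '<pad>';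
-- second component is close_count after the scan
def afix2 : List String → List String × Nat
  | [] => ([], 0)
  | t :: ts =>
    let r := afix2 ts
    if t = ")" then (t :: r.1, r.2 + 1)
    else if t = "(" then
      if r.2 > 0 then (t :: r.1, r.2 - 1)
      else ("<pad>" :: r.1, r.2)
    else (t :: r.1, r.2)

-- ring_counts = {str(i): 0 for i in range(1, 10)}
def aringInit : PySem.Dict String Int :=
  (PySem.List.pyRange 1 10 1).foldl (fun d i => d.insert (PySem.Int.toStr i) 0) PySem.Dict.empty

-- for token in tokens: if token in ring_counts: ring_counts[token] += 1
def aringCount (u : List String) : PySem.Dict String Int :=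
  u.foldl (fun d t => if d.contains t then d.insert t (d.getD t 0 + 1) else d) aringInit

-- final pass: pad token when its (running) count is odd, decrementing the count
def aringFix : List String → PySem.Dict String Int → List String
  | [], _ => []
  | t :: us, d =>
    if d.contains t ∧ PySem.Int.mod (d.getD t 0) 2 ≠ 0 then
      "<pad>" :: aringFix us (d.insert t (d.getD t 0 - 1))
    else t :: aringFix us d

def fix_basic_syntax_tokens (tokens : List String) : List String :=
  aringFix ((afix2 (afix1 tokens 0)).1) (aringCount ((afix2 (afix1 tokens 0)).1))

-- ===== PORT B =====
-- single pass; st is the stack of indices of currently-unmatched '('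
def bloop : List String → Nat → List Nat → List String × List Nat
  | [], _, st => ([], st)
  | t :: ts, i, st =>
    if t = "(" then
      let r := bloop ts (i + 1) (st ++ [i]); (t :: r.1, r.2)
    else if t = ")" then
      if st.isEmpty then
        let r := bloop ts (i + 1) st; ("<pad>" :: r.1, r.2)
      else
        let r := bloop ts (i + 1) st.dropLast; (t :: r.1, r.2)
    else
      let r := bloop ts (i + 1) st; (t :: r.1, r.2)

-- for i in stack: tokens[i] = '<pad>'
def bpad (u : List String) (st : List Nat) : List String :=
  st.foldl (fun acc i => acc.set i "<pad>") u

def bdigits : List String := ["1", "2", "3", "4", "5", "6", "7", "8", "9"]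

-- odd = {d for d in '123456789' if tokens.count(d) % 2 == 1}
def boddInit (u : List String) : PySem.Set String :=
  PySem.Set.ofList (bdigits.filter (fun d => u.count d % 2 == 1))

-- pad the token and drop it from the set
def bringFix : List String → PySem.Set String → List String
  | [], _ => []
  | t :: us, odd =>
    if PySem.Set.contains odd t then "<pad>" :: bringFix us (PySem.Set.discard odd t)
    else t :: bringFix us odd

def fix_basic_syntax_tokens_alt (tokens : List String) : List String :=
  bringFix (bpad (bloop tokens 0 []).1 (bloop tokens 0 []).2)
    (boddInit (bpad (bloop tokens 0 []).1 (bloop tokens 0 []).2))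

-- ===== PRECONDITION & SPEC =====
def Spec_fix_basic_syntax_tokens (tokens : List String) (out : List String) : Prop := out = fix_basic_syntax_tokens_alt tokens
instance (tokens : List String) (out : List String) : Decidable (Spec_fix_basic_syntax_tokens tokens out) := by unfold Spec_fix_basic_syntax_tokens; infer_instance

-- ===== CLAIM (what is proved, stated in full; the proofs are below) =====
def Claim_equal_fix_basic_syntax_tokens : Prop := ∀ (tokens : List String), Dom_fix_basic_syntax_tokens tokens → Spec_fix_basic_syntax_tokens tokens (fix_basic_syntax_tokens tokens)

-- ===== LEMMAS AND PROOFS =====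

-- proof-only model of B's stack pass on a suffix, keeping just the SIZE of the outer stack:
-- returns (suffix with all paren pads applied inside it, number of ')' that pop outer opens)
def bgo : List String → Nat → List String × Nat
  | [], _ => ([], 0)
  | t :: ts, oc =>
    if t = "(" then
      let r := bgo ts (oc + 1)
      if r.2 > 0 then (t :: r.1, r.2 - 1) else ("<pad>" :: r.1, r.2)
    else if t = ")" then
      if oc > 0 then
        let r := bgo ts (oc - 1); (t :: r.1, r.2 + 1)
      else
        let r := bgo ts 0; ("<pad>" :: r.1, r.2)
    else
      let r := bgo ts oc; (t :: r.1, r.2)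

theorem afix2_cons (t : String) (ts : List String) :
    afix2 (t :: ts) =
      if t = ")" then (t :: (afix2 ts).1, (afix2 ts).2 + 1)
      else if t = "(" then
        if (afix2 ts).2 > 0 then (t :: (afix2 ts).1, (afix2 ts).2 - 1)
        else ("<pad>" :: (afix2 ts).1, (afix2 ts).2)
      else (t :: (afix2 ts).1, (afix2 ts).2) := rfl

theorem afix2_afix1_eq_bgo (ts : List String) : ∀ oc, afix2 (afix1 ts oc) = bgo ts oc := by
  induction ts with
  | nil => intro oc; rfl
  | cons t ts ih =>
    intro oc
    by_cases hp : t = "("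
    · subst hp
      rw [show afix1 ("(" :: ts) oc = "(" :: afix1 ts (oc + 1) by simp [afix1], afix2_cons]
      simp only [ih]
      simp only [bgo]
      split_ifs <;> simp_all
    · by_cases hq : t = ")"
      · subst hq
        by_cases hoc : oc > 0
        · simp [afix1, afix2_cons, bgo, hoc, ih]
        · have h0 : oc = 0 := by omega
          subst h0
          simp [afix1, afix2_cons, bgo, ih]
      · simp [afix1, afix2_cons, bgo, hp, hq, ih]

theorem length_bpad (u : List String) (st : List Nat) : (bpad u st).length = u.length := by
  induction st generalizing u with
  | nil => rfl
  | cons j st ih => simpa [bpad, List.foldl_cons] using ih (u.set j "<pad>")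

theorem bpad_append (pre q : List String) (st : List Nat)
    (h : ∀ j ∈ st, j < pre.length) : bpad (pre ++ q) st = bpad pre st ++ q := by
  induction st generalizing pre with
  | nil => rfl
  | cons j st ih =>
    have hj : j < pre.length := h j (by simp)
    have : (pre ++ q).set j "<pad>" = pre.set j "<pad>" ++ q := by
      rw [List.set_append]; simp [hj]
    simp only [bpad, List.foldl_cons, this]
    exact ih (pre.set j "<pad>") (fun k hk => by
      simpa using h k (by simp [hk]))

theorem bpad_append_singleton (u : List String) (st : List Nat) (j : Nat) :
    bpad u (st ++ [j]) = (bpad u st).set j "<pad>" := by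
  simp [bpad, List.foldl_append]

-- the central lemma: B's indexed stack pass plus final padding, run on a suffix ts sitting
-- after a prefix pre with pending-open indices st, equals bgo on the suffix, with the
-- surviving outer opens (all but the last (bgo ts |st|).2 of st) padded inside pre
theorem bloop_cons (t : String) (ts : List String) (i : Nat) (st : List Nat) :
    bloop (t :: ts) i st =
      if t = "(" then (t :: (bloop ts (i+1) (st ++ [i])).1, (bloop ts (i+1) (st ++ [i])).2)
      else if t = ")" then
        if st.isEmpty then ("<pad>" :: (bloop ts (i+1) st).1, (bloop ts (i+1) st).2)
        else (t :: (bloop ts (i+1) st.dropLast).1, (bloop ts (i+1) st.dropLast).2)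
      else (t :: (bloop ts (i+1) st).1, (bloop ts (i+1) st).2) := rfl

theorem bgo_cons (t : String) (ts : List String) (oc : Nat) :
    bgo (t :: ts) oc =
      if t = "(" then
        (if (bgo ts (oc+1)).2 > 0 then (t :: (bgo ts (oc+1)).1, (bgo ts (oc+1)).2 - 1)
         else ("<pad>" :: (bgo ts (oc+1)).1, (bgo ts (oc+1)).2))
      else if t = ")" then
        (if oc > 0 then (t :: (bgo ts (oc-1)).1, (bgo ts (oc-1)).2 + 1)
         else ("<pad>" :: (bgo ts 0).1, (bgo ts 0).2))
      else (t :: (bgo ts oc).1, (bgo ts oc).2) := rfl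

theorem bloop_bpad_eq_bgo (ts : List String) :
    ∀ (i : Nat) (st : List Nat) (pre : List String), pre.length = i → (∀ j ∈ st, j < i) →
      bpad (pre ++ (bloop ts i st).1) (bloop ts i st).2
        = bpad pre (st.take (st.length - (bgo ts st.length).2)) ++ (bgo ts st.length).1 := by
  induction ts with
  | nil =>
    intro i st pre hpre hst
    simp [bloop, bgo, bpad_append pre [] st (fun j hj => hpre ▸ hst j hj), List.take_length]
  | cons t ts ih =>
    intro i st pre hpre hst
    have htk : ∀ k : Nat, ∀ j ∈ st.take k, j < pre.length :=
      fun k j hj => hpre ▸ hst j (List.mem_of_mem_take hj)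
    by_cases hp : t = "("
    · subst hp
      rw [bloop_cons, bgo_cons]
      simp only [String.reduceEq, reduceIte]
      have hb : ∀ j ∈ st ++ [i], j < i + 1 := by
        intro j hj
        rcases List.mem_append.mp hj with h | h
        · exact Nat.lt_succ_of_lt (hst j h)
        · simp_all
      have h := ih (i+1) (st ++ [i]) (pre ++ ["("]) (by simp [hpre]) hb
      rw [show pre ++ "(" :: (bloop ts (i+1) (st ++ [i])).1
            = (pre ++ ["("]) ++ (bloop ts (i+1) (st ++ [i])).1 by simp] at *
      rw [h]
      set p := (bgo ts (st.length + 1)).2 with hp'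
      by_cases hpos : p > 0
      · simp only [if_pos hpos]
        have hk : (st ++ [i]).length - p = st.length - (p - 1) := by simp; omega
        have hle : st.length - (p - 1) ≤ st.length := Nat.sub_le _ _
        rw [show (st ++ [i]).take ((st ++ [i]).length - (bgo ts (st ++ [i]).length).2)
              = st.take (st.length - (p - 1)) by
          rw [show (st ++ [i]).length = st.length + 1 by simp, ← hp']
          rw [show st.length + 1 - p = st.length - (p - 1) by omega]
          exact List.take_append_of_le_length hle]
        rw [bpad_append pre ["("] _ (htk _)]
        simp
      · have hz : p = 0 := by omega
        simp only [if_neg hpos, hz]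
        rw [show (st ++ [i]).take ((st ++ [i]).length - (bgo ts (st ++ [i]).length).2)
              = st ++ [i] by rw [show (st ++ [i]).length = st.length + 1 by simp, ← hp', hz]; simp]
        rw [bpad_append_singleton, bpad_append pre ["("] st (fun j hj => hpre ▸ hst j hj)]
        rw [List.set_append]
        simp [length_bpad, hpre, Nat.sub_self, List.take_length]
    · by_cases hq : t = ")"
      · subst hq
        rw [bloop_cons, bgo_cons]
        simp only [String.reduceEq, reduceIte]
        by_cases hst0 : st.isEmpty
        · have hse : st = [] := List.isEmpty_iff.mp hst0
          subst hse
          simp only [List.isEmpty_nil, List.length_nil, reduceIte, Nat.reduceGT]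
          have h := ih (i+1) [] (pre ++ ["<pad>"]) (by simp [hpre]) (by simp)
          rw [show pre ++ "<pad>" :: (bloop ts (i+1) []).1
                = (pre ++ ["<pad>"]) ++ (bloop ts (i+1) []).1 by simp]
          rw [h]
          simp [bpad]
        · have hne : st ≠ [] := fun h => hst0 (by simp [h])
          have hpos : st.length > 0 := List.length_pos_iff.mpr hne
          simp only [Bool.not_eq_true] at hst0
          simp only [hst0, Bool.false_eq_true, if_false, if_pos hpos]
          have hb : ∀ j ∈ st.dropLast, j < i + 1 :=
            fun j hj => Nat.lt_succ_of_lt (hst j (List.mem_of_mem_dropLast hj))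
          have h := ih (i+1) st.dropLast (pre ++ [")"]) (by simp [hpre]) hb
          rw [show pre ++ ")" :: (bloop ts (i+1) st.dropLast).1
                = (pre ++ [")"]) ++ (bloop ts (i+1) st.dropLast).1 by simp]
          rw [h]
          set p := (bgo ts (st.length - 1)).2 with hp'
          have hlen : st.dropLast.length = st.length - 1 := by simp
          rw [show st.dropLast.take (st.dropLast.length - (bgo ts st.dropLast.length).2)
                = st.take (st.length - (p + 1)) by
            rw [hlen, ← hp', List.dropLast_eq_take, List.take_take]
            congr 1
            omega]
          rw [bpad_append pre [")"] _ (htk _)]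
          simp
      · rw [bloop_cons, bgo_cons]
        simp only [if_neg hp, if_neg hq]

        have h := ih (i+1) st (pre ++ [t]) (by simp [hpre]) (fun j hj => Nat.lt_succ_of_lt (hst j hj))
        rw [show pre ++ t :: (bloop ts (i+1) st).1 = (pre ++ [t]) ++ (bloop ts (i+1) st).1 by simp]
        rw [h, bpad_append pre [t] _ (htk _)]
        simp

theorem parens_eq (ts : List String) :
    bpad (bloop ts 0 []).1 (bloop ts 0 []).2 = (afix2 (afix1 ts 0)).1 := by
  have h := bloop_bpad_eq_bgo ts 0 [] [] rfl (by simp)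
  simp only [List.nil_append] at h
  rw [h, afix2_afix1_eq_bgo]
  simp [bpad]

-- ring part ----------------------------------------------------------------

theorem parity_flip (v : Int) (h : PySem.Int.mod v 2 ≠ 0) : PySem.Int.mod (v - 1) 2 = 0 := by
  simp only [PySem.Int.mod_eq_emod_of_pos (by omega : (0:Int) < 2)] at *
  omega

theorem aringFix_eq_bringFix (u : List String) :
    ∀ (d : PySem.Dict String Int) (odd : PySem.Set String), odd.Nodup →
      (∀ t, (d.contains t = true ∧ PySem.Int.mod (d.getD t 0) 2 ≠ 0) ↔ t ∈ odd) →
      aringFix u d = bringFix u odd := by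
  induction u with
  | nil => intro d odd _ _; rfl
  | cons t us ih =>
    intro d odd hnd hinv
    by_cases hA : d.contains t = true ∧ PySem.Int.mod (d.getD t 0) 2 ≠ 0
    · have hmem : t ∈ odd := (hinv t).mp hA
      have hcB : PySem.Set.contains odd t = true := (PySem.Set.contains_iff odd t).mpr hmem
      simp only [aringFix, bringFix, if_pos hA, if_pos hcB]
      refine congrArg _ (ih _ _ (PySem.Set.nodup_discard odd t hnd) ?_)
      intro s
      by_cases hs : s = t
      · subst hs
        rw [PySem.Dict.getD_insert_self]
        simp [PySem.Set.mem_discard]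
        exact (PySem.Int.mod_eq_zero_iff_dvd _ _).mp (parity_flip _ hA.2)
      · rw [PySem.Dict.getD_insert_of_ne _ _ _ hs, PySem.Dict.contains_insert]
        have : (s == t) = false := by simp [hs]
        rw [this]
        simp only [Bool.false_or]
        rw [PySem.Set.mem_discard]
        constructor
        · intro h; exact ⟨(hinv s).mp h, hs⟩
        · intro h; exact (hinv s).mpr h.1
    · have hmem : t ∉ odd := fun h => hA ((hinv t).mpr h)
      have hcB : PySem.Set.contains odd t = false := by
        by_contra h
        exact hmem ((PySem.Set.contains_iff odd t).mp (by simpa using h))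
      simp only [aringFix, bringFix, if_neg hA, hcB, Bool.false_eq_true, if_false]
      exact congrArg _ (ih d odd hnd hinv)

theorem aringInit_eq : aringInit = PySem.Dict.mk
    [("1",0),("2",0),("3",0),("4",0),("5",0),("6",0),("7",0),("8",0),("9",0)] := by decide

theorem aringInit_contains (t : String) : aringInit.contains t = decide (t ∈ bdigits) := by
  rw [aringInit_eq]
  simp [PySem.Dict.contains_mk, bdigits, List.mem_cons, BEq.comm, Bool.beq_eq_decide_eq]

theorem aringInit_getD (t : String) : aringInit.getD t 0 = 0 := by
  rw [aringInit_eq, PySem.Dict.getD_eq_get?_getD]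
  simp [PySem.Dict.get?_mk_cons]
  split_ifs <;> rfl

theorem aringCount_fold_contains (u : List String) :
    ∀ (d : PySem.Dict String Int) (s : String),
      (u.foldl (fun d t => if d.contains t then d.insert t (d.getD t 0 + 1) else d) d).contains s
        = d.contains s := by
  induction u with
  | nil => intro d s; rfl
  | cons x us ih =>
    intro d s
    rw [List.foldl_cons, ih]
    by_cases hc : d.contains x
    · rw [if_pos hc, PySem.Dict.contains_insert]
      by_cases hs : s = x
      · subst hs; simp [hc]
      · simp [hs]
    · rw [if_neg hc]

theorem aringCount_fold_getD (u : List String) :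
    ∀ (d : PySem.Dict String Int) (t : String),
      (u.foldl (fun d t => if d.contains t then d.insert t (d.getD t 0 + 1) else d) d).getD t 0
        = d.getD t 0 + (if d.contains t then (u.count t : Int) else 0) := by
  induction u with
  | nil => intro d t; simp
  | cons x us ih =>
    intro d t
    rw [List.foldl_cons]
    by_cases hc : d.contains x
    · rw [if_pos hc, ih]
      by_cases ht : t = x
      · subst ht
        rw [PySem.Dict.getD_insert_self]
        have h1 : (d.insert t (d.getD t 0 + 1)).contains t = true :=
          PySem.Dict.contains_insert_self d t _
        rw [if_pos h1, if_pos hc, List.count_cons_self]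
        push_cast
        ring
      · rw [PySem.Dict.getD_insert_of_ne _ _ _ ht, PySem.Dict.contains_insert]
        have hbx : (t == x) = false := by simp [ht]
        rw [hbx]
        simp only [Bool.false_or]
        rw [List.count_cons_of_ne (Ne.symm ht)]
    · rw [if_neg hc, ih]
      by_cases ht : t = x
      · subst ht
        simp [hc]
      · by_cases hct : d.contains t
        · rw [if_pos hct, if_pos hct, List.count_cons_of_ne (Ne.symm ht)]
        · simp [hct]

theorem ring_eq (u : List String) : aringFix u (aringCount u) = bringFix u (boddInit u) := by
  apply aringFix_eq_bringFix u _ _ (PySem.Set.nodup_ofList _)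
  intro t
  simp only [aringCount]
  rw [aringCount_fold_contains, aringCount_fold_getD, aringInit_contains, aringInit_getD,
      PySem.Set.mem_ofList, List.mem_filter]
  by_cases hb : t ∈ bdigits
  · simp only [hb, decide_true, if_pos, true_and, zero_add]
    rw [PySem.Int.mod_eq_emod_of_pos (by omega : (0:Int) < 2)]
    simp only [beq_iff_eq]
    constructor
    · intro h
      omega
    · intro h
      omega
  · simp [hb]

-- ===== VERDICT (by name: the statement is the Claim_ definition above) =====
theorem fix_basic_syntax_tokens_spec : Claim_equal_fix_basic_syntax_tokens := by
  intro tokens _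
  unfold Spec_fix_basic_syntax_tokens fix_basic_syntax_tokens fix_basic_syntax_tokens_alt
  rw [parens_eq, ring_eq]
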